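-- pv_equiv track=rewrite | github.com/recdnd/spiral-core-series | versions/v0.040/spiral_core_v040_frontier-fix.py | conflict_signature
-- ===== SOURCE A (Python) =====
-- from typing import Dict, List, Optional, Set, Tuple
--
-- def conflict_signature(total: int, rows: List[Tuple[str,int,str,int]], topn: int=3) -> Tuple[str,str,List[Tuple[str,int,str,int]]]:
--     payload_parts, sig_parts, kept = [], [], []
--     for (k, heat, dom_v, dom_c) in rows[:topn]:
--         if heat <= 0: break
--         kept.append((k, heat, dom_v, dom_c))
--         payload_parts.append(f"{k}:{heat}:{dom_v}:{dom_c}")   # payload keeps dom_count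
--         sig_parts.append(f"{k}:{heat}:{dom_v}")              # signature omits dom_count
--     top_payload = ",".join(payload_parts)
--     sig = f"total={total}|top={','.join(sig_parts)}"
--     return top_payload, sig, kept
-- ===== SOURCE B (Python) =====
-- def conflict_signature(total, rows, topn=3):
--     # Recursive single pass: builds the comma-joined payload/signature strings
--     # directly while recursing, instead of accumulating part-lists and joining.
--     def go(rs, n):
--         if n <= 0 or not rs:
--             return "", "", []
--         (k, heat, dom_v, dom_c) = rs[0]
--         if heat <= 0:
--             return "", "", []
--         p_rest, s_rest, kept_rest = go(rs[1:], n - 1)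
--         p_head = f"{k}:{heat}:{dom_v}:{dom_c}"
--         s_head = f"{k}:{heat}:{dom_v}"
--         if kept_rest:
--             return (p_head + "," + p_rest, s_head + "," + s_rest,
--                     [(k, heat, dom_v, dom_c)] + kept_rest)
--         return p_head, s_head, [(k, heat, dom_v, dom_c)]
--
--     top_payload, top_sig, kept = go(rows, topn)
--     return top_payload, f"total={total}|top={top_sig}", kept
-- ===== Notes on version B (the rewrite author's own statement) =====
-- stated objective: alternative
-- what changed: Replaces A's iterative loop-with-break over rows[:topn] that grows three part-lists and joins them at the end by a recursive single pass that decrements topn, stops at the first non-positive heat, and concatenates the comma-joined payload and signature strings directly during the recursion (no slicing, no part lists, no join).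
-- intended difference: When topn is negative and rows[:topn] still contains rows whose first entry has positive heat, A accidentally keeps a prefix of rows because Python's negative slice bound wraps from the end, while B keeps nothing (empty payload, 'total=...|top=' signature, empty kept list); keeping nothing is the intended meaning of asking for a non-positive number of top rows. — e.g. on conflict_signature(0, [("a", 1, "b", 0), ("c", 1, "d", 0)], -1): A returns ("a:1:b:0", "total=0|top=a:1:b", [("a", 1, "b", 0)]), B returns ("", "total=0|top=", [])
import Mathlib
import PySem

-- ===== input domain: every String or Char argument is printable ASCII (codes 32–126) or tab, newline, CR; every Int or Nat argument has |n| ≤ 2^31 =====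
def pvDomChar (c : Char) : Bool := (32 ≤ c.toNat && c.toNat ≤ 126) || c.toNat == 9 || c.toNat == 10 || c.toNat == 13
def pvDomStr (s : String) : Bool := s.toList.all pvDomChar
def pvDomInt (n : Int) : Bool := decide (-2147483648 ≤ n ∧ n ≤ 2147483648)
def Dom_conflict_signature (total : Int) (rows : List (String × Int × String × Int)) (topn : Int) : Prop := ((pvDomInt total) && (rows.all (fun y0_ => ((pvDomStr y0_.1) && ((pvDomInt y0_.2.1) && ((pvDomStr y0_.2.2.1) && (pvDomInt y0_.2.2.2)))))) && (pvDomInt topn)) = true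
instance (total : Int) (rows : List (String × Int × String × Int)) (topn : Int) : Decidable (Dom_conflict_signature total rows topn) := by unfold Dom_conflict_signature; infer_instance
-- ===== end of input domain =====

-- B replaces A's loop-with-break plus part-lists plus final joins by a recursive single pass that
-- decrements topn and concatenates the joined strings directly ('alternative', same cost);
-- equivalence is about the return value (neither version mutates its arguments).

-- ===== PORT A =====
-- A's loop over rows[:topn], breaking at the first heat <= 0, appending to three accumulators.
def conflictLoop (pp sp : List String) (kept : List (String × Int × String × Int)) :
    List (String × Int × String × Int) → List String × List String × List (String × Int × String × Int)
  | [] => (pp, sp, kept)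
  | (k, heat, dom_v, dom_c) :: rs =>
    if heat ≤ 0 then (pp, sp, kept)
    else conflictLoop
      (pp ++ [k ++ ":" ++ PySem.Int.toStr heat ++ ":" ++ dom_v ++ ":" ++ PySem.Int.toStr dom_c])
      (sp ++ [k ++ ":" ++ PySem.Int.toStr heat ++ ":" ++ dom_v])
      (kept ++ [(k, heat, dom_v, dom_c)]) rs

def conflict_signature (total : Int) (rows : List (String × Int × String × Int)) (topn : Int) : String × String × (List (String × Int × String × Int)) :=
  let r := conflictLoop [] [] [] (PySem.List.slice rows none (some topn))
  (PySem.Str.join "," r.1,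
   "total=" ++ PySem.Int.toStr total ++ "|top=" ++ PySem.Str.join "," r.2.1,
   r.2.2)

-- ===== PORT B =====
-- Source B's inner 'go': recursion on the rows, counting topn down, building the joined strings directly.
def conflictGo : List (String × Int × String × Int) → Int → String × String × (List (String × Int × String × Int))
  | rs, n =>
    if n ≤ 0 then ("", "", [])
    else
      match rs with
      | [] => ("", "", [])
      | (k, heat, dom_v, dom_c) :: rest =>
        if heat ≤ 0 then ("", "", [])
        else
          let r := conflictGo rest (n - 1)
          let p_head := k ++ ":" ++ PySem.Int.toStr heat ++ ":" ++ dom_v ++ ":" ++ PySem.Int.toStr dom_c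
          let s_head := k ++ ":" ++ PySem.Int.toStr heat ++ ":" ++ dom_v
          if r.2.2.isEmpty then (p_head, s_head, [(k, heat, dom_v, dom_c)])
          else (p_head ++ "," ++ r.1, s_head ++ "," ++ r.2.1, (k, heat, dom_v, dom_c) :: r.2.2)

def conflict_signature_alt (total : Int) (rows : List (String × Int × String × Int)) (topn : Int) : String × String × (List (String × Int × String × Int)) :=
  let r := conflictGo rows topn
  (r.1, "total=" ++ PySem.Int.toStr total ++ "|top=" ++ r.2.1, r.2.2)

-- ===== PRECONDITION & SPEC =====
-- When topn is negative and rows[:topn] still contains rows whose first entry has positive heat,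
-- A accidentally keeps a prefix of rows (Python's negative slice bound wraps from the end) while B
-- keeps nothing; keeping nothing is the intended meaning of a non-positive top-n request.
def D_conflict_signature (total : Int) (rows : List (String × Int × String × Int)) (topn : Int) : Prop :=
  topn < 0 ∧ 0 < (rows.length : Int) + topn ∧ 0 < ((rows.head?.map (fun r => r.2.1)).getD 0)
instance (total : Int) (rows : List (String × Int × String × Int)) (topn : Int) : Decidable (D_conflict_signature total rows topn) := by unfold D_conflict_signature; infer_instance

def Spec_conflict_signature (total : Int) (rows : List (String × Int × String × Int)) (topn : Int) (out : String × String × (List (String × Int × String × Int))) : Prop := ¬ D_conflict_signature total rows topn → out = conflict_signature_alt total rows topn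
instance (total : Int) (rows : List (String × Int × String × Int)) (topn : Int) (out : String × String × (List (String × Int × String × Int))) : Decidable (Spec_conflict_signature total rows topn out) := by unfold Spec_conflict_signature; infer_instance

def pvDiffWitness_conflict_signature : Int × (List (String × Int × String × Int)) × Int :=
  (0, [("a", 1, "b", 0), ("c", 1, "d", 0)], -1)
def pvDiffWitnessOut_conflict_signature : (String × String × (List (String × Int × String × Int))) × (String × String × (List (String × Int × String × Int))) :=
  (("a:1:b:0", "total=0|top=a:1:b", [("a", 1, "b", 0)]), ("", "total=0|top=", []))

-- ===== CLAIM (what is proved, stated in full; the proofs are below) =====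
def Claim_unchanged_conflict_signature : Prop := ∀ (total : Int) (rows : List (String × Int × String × Int)) (topn : Int), Dom_conflict_signature total rows topn → Spec_conflict_signature total rows topn (conflict_signature total rows topn)
def Claim_changed_conflict_signature : Prop := Dom_conflict_signature (pvDiffWitness_conflict_signature.1) (pvDiffWitness_conflict_signature.2.1) (pvDiffWitness_conflict_signature.2.2) ∧ D_conflict_signature (pvDiffWitness_conflict_signature.1) (pvDiffWitness_conflict_signature.2.1) (pvDiffWitness_conflict_signature.2.2) ∧ conflict_signature (pvDiffWitness_conflict_signature.1) (pvDiffWitness_conflict_signature.2.1) (pvDiffWitness_conflict_signature.2.2) = pvDiffWitnessOut_conflict_signature.1 ∧ conflict_signature_alt (pvDiffWitness_conflict_signature.1) (pvDiffWitness_conflict_signature.2.1) (pvDiffWitness_conflict_signature.2.2) = pvDiffWitnessOut_conflict_signature.2 ∧ pvDiffWitnessOut_conflict_signature.1 ≠ pvDiffWitnessOut_conflict_signature.2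
def Claim_exact_conflict_signature : Prop := ∀ (total : Int) (rows : List (String × Int × String × Int)) (topn : Int), Dom_conflict_signature total rows topn → D_conflict_signature total rows topn → conflict_signature total rows topn ≠ conflict_signature_alt total rows topn

-- ===== LEMMAS AND PROOFS =====

-- the prefix a break-at-first-nonpositive-heat scan keeps
def keepPre : List (String × Int × String × Int) → List (String × Int × String × Int)
  | [] => []
  | r :: rs => if r.2.1 ≤ 0 then [] else r :: keepPre rs

def fmtP (r : String × Int × String × Int) : String :=
  r.1 ++ ":" ++ PySem.Int.toStr r.2.1 ++ ":" ++ r.2.2.1 ++ ":" ++ PySem.Int.toStr r.2.2.2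
def fmtS (r : String × Int × String × Int) : String :=
  r.1 ++ ":" ++ PySem.Int.toStr r.2.1 ++ ":" ++ r.2.2.1

theorem sjoin_nil (s : String) : PySem.Str.join s [] = "" := by
  simp [PySem.Str.join, PySem.Chars.join_nil]
theorem sjoin_singleton (s p : String) : PySem.Str.join s [p] = p := by
  simp [PySem.Str.join, PySem.Chars.join_singleton]
theorem sjoin_cons_cons (s p q : String) (r : List String) :
    PySem.Str.join s (p :: q :: r) = p ++ s ++ PySem.Str.join s (q :: r) := by
  simp [PySem.Str.join, PySem.Chars.join_cons_cons, String.append_assoc]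

theorem conflictLoop_eq (l : List (String × Int × String × Int))
    (pp sp : List String) (kept : List (String × Int × String × Int)) :
    conflictLoop pp sp kept l =
      (pp ++ (keepPre l).map fmtP, sp ++ (keepPre l).map fmtS, kept ++ keepPre l) := by
  induction l generalizing pp sp kept with
  | nil => simp [conflictLoop, keepPre]
  | cons r rs ih =>
    obtain ⟨k, heat, dom_v, dom_c⟩ := r
    by_cases h : heat ≤ 0
    · simp [conflictLoop, keepPre, h]
    · simp only [conflictLoop, keepPre, h, if_false, ih]
      simp [fmtP, fmtS]

theorem conflictGo_eq (l : List (String × Int × String × Int)) (n : Int) :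
    conflictGo l n =
      (PySem.Str.join "," ((keepPre (l.take n.toNat)).map fmtP),
       PySem.Str.join "," ((keepPre (l.take n.toNat)).map fmtS),
       keepPre (l.take n.toNat)) := by
  induction l generalizing n with
  | nil =>
    rw [conflictGo]
    simp [keepPre, sjoin_nil]
  | cons r rs ih =>
    by_cases hn : n ≤ 0
    · have h0 : n.toNat = 0 := by omega
      rw [conflictGo]
      simp [hn, h0, keepPre, sjoin_nil]
    · have h1 : n.toNat = (n - 1).toNat + 1 := by omega
      obtain ⟨k, heat, dom_v, dom_c⟩ := r
      rw [conflictGo, h1]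
      simp only [hn, if_false, List.take_succ_cons]
      by_cases hh : heat ≤ 0
      · simp [keepPre, hh, sjoin_nil]
      · simp only [keepPre, hh, if_false, ih, List.map_cons]
        rcases hk : keepPre (rs.take (n - 1).toNat) with _ | ⟨q, qs⟩
        · simp [sjoin_singleton, fmtP, fmtS]
        · simp [sjoin_cons_cons, fmtP, fmtS]

-- slice with a negative stop, as a take
theorem slice_neg_stop (l : List (String × Int × String × Int)) (topn : Int) (h : topn < 0) :
    PySem.List.slice l none (some topn) = l.take (l.length - (-topn).toNat) := by
  have hk : 0 < (-topn).toNat := by omega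
  have : topn = -(((-topn).toNat : Nat) : Int) := by omega
  rw [this, PySem.List.slice_to_neg_natCast _ _ hk]
  congr 2
  omega

theorem conflict_signature_spec : Claim_unchanged_conflict_signature := by
  intro total rows topn _ hD'
  unfold conflict_signature conflict_signature_alt
  rw [conflictLoop_eq, conflictGo_eq]
  simp only [List.nil_append]
  by_cases hpos : 0 ≤ topn
  · rw [PySem.List.slice_to _ hpos]
  · have htn : topn < 0 := by omega
    have h0 : topn.toNat = 0 := by omega
    rw [slice_neg_stop _ _ htn, h0]
    simp only [List.take_zero]
    rcases hlen : rows.length - (-topn).toNat with _ | m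
    · simp [keepPre, sjoin_nil]
    · -- the slice is nonempty: rows is nonempty and D_ fails, so the first heat is ≤ 0
      rcases rows with _ | ⟨r, rs⟩
      · simp at hlen
      · have hheat : r.2.1 ≤ 0 := by
          by_contra hgt
          exact hD' ⟨htn, by omega, by simpa using (by omega : 0 < r.2.1)⟩
        simp [keepPre, hheat, sjoin_nil]

theorem conflict_signature_tight : Claim_exact_conflict_signature := by
  intro total rows topn _ hD heq
  obtain ⟨htn, hlen, hheat⟩ := hD
  rcases rows with _ | ⟨r, rs⟩
  · simp at hlen; omega
  · have hheat' : 0 < r.2.1 := by simpa using hheat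
    have hkA := congrArg (fun o => o.2.2) heq
    simp only [conflict_signature, conflict_signature_alt] at hkA
    rw [conflictLoop_eq, conflictGo_eq] at hkA
    have h0 : topn.toNat = 0 := by omega
    rw [slice_neg_stop _ _ htn, h0] at hkA
    rcases hl : (r :: rs).length - (-topn).toNat with _ | m
    · omega
    · rw [hl] at hkA
      simp [keepPre, List.take_succ_cons, show ¬ r.2.1 ≤ 0 by omega] at hkA

theorem conflict_signature_changed : Claim_changed_conflict_signature := by
  unfold Claim_changed_conflict_signature
  refine ⟨by decide, by decide, by decide, by decide, by decide⟩
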